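-- pv_equiv track=rewrite | github.com/AllanKoder/Competitive-Programming-Training | kattis-coaching/stack.py | min_push_pop
-- ===== SOURCE A (Python) =====
-- def min_push_pop(s):
--     n = len(s)
--     dp = [[0] * n for _ in range(n)]
--
--     # length 1 substrings
--     for i in range(n):
--         dp[i][i] = 2  # push + pop for one char
--
--     # fill for increasing lengths
--     for length in range(2, n + 1):
--         for i in range(n - length + 1):
--             j = i + length - 1
--
--             # Option 1: handle s[i] separately
--             best = 2 + dp[i + 1][j]
--
--             # Option 2: reuse s[i] with a matching s[k]
--             for k in range(i + 1, j + 1):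
--                 if s[i] == s[k]:
--                     best = min(best, dp[i + 1][k - 1] + dp[k][j])
--
--             dp[i][j] = best
--
--     return dp[0][n - 1]
-- ===== SOURCE B (Python) =====
-- def min_push_pop(s):
--     n = len(s)
--     memo = {}
--
--     def solve(i, j):
--         if j < i:
--             return 0
--         if i == j:
--             return 2
--         if (i, j) in memo:
--             return memo[(i, j)]
--         best = 2 + solve(i + 1, j)
--         for k in range(i + 1, j + 1):
--             if s[i] == s[k]:
--                 best = min(best, solve(i + 1, k - 1) + solve(k, j))
--         memo[(i, j)] = best
--         return best
--
--     return solve(0, n - 1)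
-- ===== Notes on version B (the rewrite author's own statement) =====
-- stated objective: alternative
-- what changed: A's bottom-up length-by-length interval-DP table is replaced by top-down memoized recursion solve(i, j) over intervals, with an (i, j)-keyed memo dict instead of the n x n list-of-lists table; Pre_ excludes only the empty string, on which A raises IndexError.
import Mathlib
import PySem

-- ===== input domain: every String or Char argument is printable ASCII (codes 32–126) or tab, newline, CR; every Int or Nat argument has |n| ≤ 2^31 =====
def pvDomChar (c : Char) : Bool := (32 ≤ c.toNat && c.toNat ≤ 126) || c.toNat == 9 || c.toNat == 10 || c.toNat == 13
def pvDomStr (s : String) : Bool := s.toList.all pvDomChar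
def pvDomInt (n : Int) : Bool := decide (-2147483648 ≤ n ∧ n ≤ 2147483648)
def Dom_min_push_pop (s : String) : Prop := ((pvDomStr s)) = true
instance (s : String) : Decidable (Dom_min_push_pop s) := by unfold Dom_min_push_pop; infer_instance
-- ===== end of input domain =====

-- B replaces A's bottom-up interval-DP table by top-down memoized recursion over intervals
-- (alternative decomposition, same asymptotic cost); equal return values on nonempty strings.

-- ===== PORT A =====
-- dp[i][j] read / write on the list-of-lists table; every access A performs on a Pre_ input is in
-- range (proved below via pvShape), so pyGetD's default is never returned there; the single
-- out-of-range access, dp[0][-1] on s = "" (IndexError), is excluded by Pre_.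
def pvGet2 (dp : List (List Int)) (i j : Int) : Int :=
  PySem.List.pyGetD (PySem.List.pyGetD dp i []) j 0

def pvSet2 (dp : List (List Int)) (i j : Int) (v : Int) : List (List Int) :=
  dp.set i.toNat ((PySem.List.pyGetD dp i []).set j.toNat v)

-- body of A's 'for i in range(n - length + 1)' loop, kept as a named helper
def pvStepI (s : String) (length : Int) (dp : List (List Int)) (i : Int) : List (List Int) :=
  let j := i + length - 1
  let best0 := 2 + pvGet2 dp (i + 1) j
  let best := (PySem.List.pyRange (i + 1) (j + 1)).foldl (fun best k =>
    if PySem.Str.pyGet? s i == PySem.Str.pyGet? s k then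
      min best (pvGet2 dp (i + 1) (k - 1) + pvGet2 dp k j)
    else best) best0
  pvSet2 dp i j best

def min_push_pop (s : String) : Int :=
  let n : Int := PySem.Str.len s
  let dp0 : List (List Int) := (PySem.List.pyRange 0 n).map (fun _ => List.replicate n.toNat (0 : Int))
  let dp1 : List (List Int) := (PySem.List.pyRange 0 n).foldl (fun dp i => pvSet2 dp i i 2) dp0
  let dp2 : List (List Int) := (PySem.List.pyRange 2 (n + 1)).foldl (fun dp length =>
    (PySem.List.pyRange 0 (n - length + 1)).foldl (pvStepI s length) dp) dp1
  pvGet2 dp2 0 (n - 1)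

-- ===== PORT B =====
-- Source B's solve(i, j) with the memo dict threaded through; 'fuel' only makes the recursion
-- structural (it stays at least the interval width at every call, so the 0 branch is dead).
def pvSolve (s : String) : Nat → PySem.Dict (Int × Int) Int → Int → Int → Int × PySem.Dict (Int × Int) Int
  | fuel, memo, i, j =>
    if j < i then (0, memo)
    else if i = j then (2, memo)
    else
      match memo.get? (i, j) with
      | some v => (v, memo)
      | none =>
        match fuel with
        | 0 => (0, memo)
        | Nat.succ fuel =>
          let r1 := pvSolve s fuel memo (i + 1) j
          let res := (PySem.List.pyRange (i + 1) (j + 1)).foldl (fun acc k =>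
            if PySem.Str.pyGet? s i == PySem.Str.pyGet? s k then
              let ra := pvSolve s fuel acc.2 (i + 1) (k - 1)
              let rb := pvSolve s fuel ra.2 k j
              (min acc.1 (ra.1 + rb.1), rb.2)
            else acc) (2 + r1.1, r1.2)
          (res.1, res.2.insert (i, j) res.1)

def min_push_pop_alt (s : String) : Int :=
  let n : Int := PySem.Str.len s
  (pvSolve s n.toNat PySem.Dict.empty 0 (n - 1)).1

-- ===== PRECONDITION & SPEC =====
-- Pre_ excludes only the empty string, on which A raises IndexError (dp[0][-1] on the empty table).
def Pre_min_push_pop (s : String) : Prop := s ≠ ""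
instance (s : String) : Decidable (Pre_min_push_pop s) := by unfold Pre_min_push_pop; infer_instance
def pvWitness_min_push_pop : String := "ab"

def Spec_min_push_pop (s : String) (out : Int) : Prop := out = min_push_pop_alt s
instance (s : String) (out : Int) : Decidable (Spec_min_push_pop s out) := by unfold Spec_min_push_pop; infer_instance

-- ===== CLAIM (what is proved, stated in full; the proofs are below) =====
def Claim_equal_min_push_pop : Prop := ∀ (s : String), Dom_min_push_pop s → Pre_min_push_pop s → Spec_min_push_pop s (min_push_pop s)

-- ===== LEMMAS AND PROOFS =====

-- the common interval recurrence, fuel-indexed (any fuel ≥ the interval width computes it)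
def pvG (s : String) (fuel : Nat) (i j : Int) : Int :=
  if j < i then 0
  else if i = j then 2
  else
    match fuel with
    | 0 => 0
    | Nat.succ fuel =>
      (PySem.List.pyRange (i + 1) (j + 1)).foldl (fun best k =>
        if PySem.Str.pyGet? s i == PySem.Str.pyGet? s k then
          min best (pvG s fuel (i + 1) (k - 1) + pvG s fuel k j)
        else best) (2 + pvG s fuel (i + 1) j)

def pvGG (s : String) (i j : Int) : Int := pvG s (j - i).toNat i j

lemma pvG_fuel (s : String) : ∀ f1 f2 : Nat, ∀ i j : Int,
    (j - i).toNat ≤ f1 → (j - i).toNat ≤ f2 → pvG s f1 i j = pvG s f2 i j := by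
  intro f1
  induction f1 with
  | zero =>
    intro f2 i j h1 _
    rw [pvG.eq_def, pvG.eq_def]
    by_cases h : j < i
    · simp [h]
    · have hij : i = j := by omega
      simp [hij]
  | succ f ih =>
    intro f2 i j h1 h2
    by_cases hlt : j < i
    · rw [pvG.eq_def, pvG.eq_def]; simp [hlt]
    · by_cases heq : i = j
      · rw [pvG.eq_def, pvG.eq_def]; simp [heq]
      · have hij : i < j := by omega
        obtain ⟨f2', rfl⟩ : ∃ f2', f2 = f2' + 1 := ⟨f2 - 1, by omega⟩
        rw [pvG.eq_def, pvG.eq_def]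
        simp only [if_neg hlt, if_neg heq]
        rw [ih f2' (i + 1) j (by omega) (by omega)]
        apply PySem.List.foldl_congr_mem
        intro acc k hk
        rw [PySem.List.mem_pyRange_one] at hk
        split_ifs with hc
        · rw [ih f2' (i + 1) (k - 1) (by omega) (by omega), ih f2' k j (by omega) (by omega)]
        · rfl

lemma pvGG_of_lt {s : String} {i j : Int} (h : j < i) : pvGG s i j = 0 := by
  rw [pvGG, pvG.eq_def]; simp [h]

lemma pvGG_of_eq {s : String} {i j : Int} (h : i = j) : pvGG s i j = 2 := by
  subst h; rw [pvGG, pvG.eq_def]; simp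

lemma pvGG_unfold (s : String) {i j : Int} (h : i < j) :
    pvGG s i j = (PySem.List.pyRange (i + 1) (j + 1)).foldl (fun best k =>
      if PySem.Str.pyGet? s i == PySem.Str.pyGet? s k then
        min best (pvGG s (i + 1) (k - 1) + pvGG s k j)
      else best) (2 + pvGG s (i + 1) j) := by
  obtain ⟨f, hf⟩ : ∃ f, (j - i).toNat = f + 1 := ⟨(j - i).toNat - 1, by omega⟩
  rw [pvGG, hf, pvG.eq_def]
  simp only [if_neg (show ¬ j < i by omega), if_neg (show ¬ i = j by omega)]
  rw [show pvG s f (i + 1) j = pvGG s (i + 1) j from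
    pvG_fuel s f _ (i + 1) j (by omega) (by omega)]
  apply PySem.List.foldl_congr_mem
  intro acc k hk
  rw [PySem.List.mem_pyRange_one] at hk
  split_ifs with hc
  · rw [show pvG s f (i + 1) (k - 1) = pvGG s (i + 1) (k - 1) from
      pvG_fuel s f _ _ _ (by omega) (by omega),
      show pvG s f k j = pvGG s k j from pvG_fuel s f _ _ _ (by omega) (by omega)]
  · rfl

-- ===== B side: the memoized recursion computes pvGG =====
def pvMemoOK (s : String) (memo : PySem.Dict (Int × Int) Int) : Prop :=
  ∀ p v, memo.get? p = some v → v = pvGG s p.1 p.2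

lemma pvSolve_correct (s : String) : ∀ fuel : Nat, ∀ i j : Int, ∀ memo,
    (j - i).toNat ≤ fuel → pvMemoOK s memo →
    (pvSolve s fuel memo i j).1 = pvGG s i j ∧ pvMemoOK s (pvSolve s fuel memo i j).2 := by
  intro fuel
  induction fuel with
  | zero =>
    intro i j memo h hm
    rw [pvSolve.eq_def]
    by_cases hlt : j < i
    · simp only [if_pos hlt]; exact ⟨(pvGG_of_lt hlt).symm, hm⟩
    · have heq : i = j := by omega
      simp only [if_neg hlt, if_pos heq]
      exact ⟨(pvGG_of_eq heq).symm, hm⟩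
  | succ f ih =>
    intro i j memo h hm
    rw [pvSolve.eq_def]
    by_cases hlt : j < i
    · simp only [if_pos hlt]; exact ⟨(pvGG_of_lt hlt).symm, hm⟩
    · by_cases heq : i = j
      · simp only [if_neg hlt, if_pos heq]
        exact ⟨(pvGG_of_eq heq).symm, hm⟩
      · have hij : i < j := by omega
        simp only [if_neg hlt, if_neg heq]
        cases hget : memo.get? (i, j) with
        | some v =>
          exact ⟨hm (i, j) v hget, hm⟩
        | none =>
          have hr1 := ih (i + 1) j memo (by omega) hm
          have hfold : ∀ l : List Int, (∀ k ∈ l, i + 1 ≤ k ∧ k ≤ j) →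
              ∀ (best : Int) (memo' : PySem.Dict (Int × Int) Int), pvMemoOK s memo' →
              (l.foldl (fun acc k =>
                if PySem.Str.pyGet? s i == PySem.Str.pyGet? s k then
                  let ra := pvSolve s f acc.2 (i + 1) (k - 1)
                  let rb := pvSolve s f ra.2 k j
                  (min acc.1 (ra.1 + rb.1), rb.2)
                else acc) (best, memo')).1
                = l.foldl (fun best k =>
                    if PySem.Str.pyGet? s i == PySem.Str.pyGet? s k then
                      min best (pvGG s (i + 1) (k - 1) + pvGG s k j)
                    else best) best ∧
              pvMemoOK s (l.foldl (fun acc k =>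
                if PySem.Str.pyGet? s i == PySem.Str.pyGet? s k then
                  let ra := pvSolve s f acc.2 (i + 1) (k - 1)
                  let rb := pvSolve s f ra.2 k j
                  (min acc.1 (ra.1 + rb.1), rb.2)
                else acc) (best, memo')).2 := by
            intro l
            induction l with
            | nil => intro _ best memo' hm'; exact ⟨rfl, hm'⟩
            | cons k t iht =>
              intro hmem best memo' hm'
              obtain ⟨hk1, hk2⟩ := hmem k (List.mem_cons_self)
              simp only [List.foldl_cons]
              by_cases hc : (PySem.Str.pyGet? s i == PySem.Str.pyGet? s k) = true
              · rw [if_pos hc, if_pos hc]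
                have hA := ih (i + 1) (k - 1) memo' (by omega) hm'
                have hB := ih k j (pvSolve s f memo' (i + 1) (k - 1)).2 (by omega) hA.2
                show ((t.foldl _ ((min best ((pvSolve s f memo' (i + 1) (k - 1)).1 +
                    (pvSolve s f (pvSolve s f memo' (i + 1) (k - 1)).2 k j).1)),
                    (pvSolve s f (pvSolve s f memo' (i + 1) (k - 1)).2 k j).2)).1 = _) ∧ _
                rw [hA.1, hB.1]
                exact iht (fun x hx => hmem x (List.mem_cons_of_mem _ hx)) _ _ hB.2
              · rw [if_neg hc, if_neg hc]
                exact iht (fun x hx => hmem x (List.mem_cons_of_mem _ hx)) best memo' hm'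
          have hmem : ∀ k ∈ PySem.List.pyRange (i + 1) (j + 1), i + 1 ≤ k ∧ k ≤ j := by
            intro k hk; rw [PySem.List.mem_pyRange_one] at hk; omega
          have hf := hfold (PySem.List.pyRange (i + 1) (j + 1)) hmem
            (2 + (pvSolve s f memo (i + 1) j).1) (pvSolve s f memo (i + 1) j).2 hr1.2
          constructor
          · rw [hf.1, hr1.1, ← pvGG_unfold s hij]
          · intro p v hv
            rw [PySem.Dict.get?_insert] at hv
            by_cases hp : p = (i, j)
            · rw [if_pos hp] at hv
              injection hv with hv
              subst hp
              rw [← hv, hf.1, hr1.1, ← pvGG_unfold s hij]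
            · rw [if_neg hp] at hv
              exact hf.2 p v hv

lemma pvAlt_eq (s : String) : min_push_pop_alt s = pvGG s 0 (PySem.Str.len s - 1) := by
  have h0 : (0 : Int) ≤ PySem.Str.len s := by
    rw [PySem.Str.len_eq]; exact Int.natCast_nonneg _
  have hmt : pvMemoOK s PySem.Dict.empty := by
    intro p v hv; rw [PySem.Dict.get?_empty] at hv; cases hv
  exact (pvSolve_correct s (PySem.Str.len s).toNat 0 (PySem.Str.len s - 1)
    PySem.Dict.empty (by omega) hmt).1

-- ===== A side: the table holds pvGG on all filled widths =====
def pvShape (n : Int) (dp : List (List Int)) : Prop :=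
  dp.length = n.toNat ∧ ∀ r ∈ dp, r.length = n.toNat

def pvCorrect (s : String) (n w : Int) (dp : List (List Int)) : Prop :=
  ∀ i j : Int, 0 ≤ i → i < n → 0 ≤ j → j < n → j - i ≤ w → pvGet2 dp i j = pvGG s i j

lemma pvCorrect_mono {s : String} {n w w' : Int} {dp : List (List Int)}
    (h : pvCorrect s n w dp) (hw : w' ≤ w) : pvCorrect s n w' dp :=
  fun i j hi hin hj hjn hw' => h i j hi hin hj hjn (le_trans hw' hw)

lemma pvGetD_set_eq {α : Type} (l : List α) (a b : Nat) (v d : α) :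
    (l.set a v).getD b d = if a = b ∧ a < l.length then v else l.getD b d := by
  rw [List.getD_eq_getElem?_getD, List.getD_eq_getElem?_getD, List.getElem?_set]
  split_ifs with h1 h2 h3 <;> first | rfl | (simp_all; omega) | simp_all

lemma pvGet2_getD (dp : List (List Int)) {i j : Int} (hi : 0 ≤ i) (hj : 0 ≤ j) :
    pvGet2 dp i j = (dp.getD i.toNat []).getD j.toNat 0 := by
  unfold pvGet2
  rw [PySem.List.pyGetD_of_nonneg _ _ hj, PySem.List.pyGetD_of_nonneg _ _ hi]

lemma pvSet2_getD (dp : List (List Int)) {i : Int} (hi : 0 ≤ i) (j : Int) (v : Int) :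
    pvSet2 dp i j v = dp.set i.toNat ((dp.getD i.toNat []).set j.toNat v) := by
  unfold pvSet2
  rw [PySem.List.pyGetD_of_nonneg _ _ hi]

lemma pvSet2_shape {n : Int} {dp : List (List Int)} (hsh : pvShape n dp)
    {i : Int} (hi : 0 ≤ i) (hin : i < n) (j : Int) (v : Int) :
    pvShape n (pvSet2 dp i j v) := by
  rw [pvSet2_getD dp hi]
  constructor
  · rw [List.length_set]; exact hsh.1
  · intro r hr
    rcases List.mem_or_eq_of_mem_set hr with hmem | rfl
    · exact hsh.2 r hmem
    · rw [List.length_set]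
      apply hsh.2
      rw [List.getD_eq_getElem _ _ (by rw [hsh.1]; omega)]
      exact List.getElem_mem _

lemma pvSet2_get {n : Int} {dp : List (List Int)} (hsh : pvShape n dp)
    {i j i' j' : Int} (v : Int) (hi : 0 ≤ i) (hin : i < n) (hj : 0 ≤ j) (hjn : j < n)
    (hi' : 0 ≤ i') (hin' : i' < n) (hj' : 0 ≤ j') (hjn' : j' < n) :
    pvGet2 (pvSet2 dp i j v) i' j' = if i' = i ∧ j' = j then v else pvGet2 dp i' j' := by
  have hrowlen : (dp.getD i.toNat []).length = n.toNat := by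
    apply hsh.2
    rw [List.getD_eq_getElem _ _ (by rw [hsh.1]; omega)]
    exact List.getElem_mem _
  rw [pvSet2_getD dp hi, pvGet2_getD _ hi' hj', pvGet2_getD dp hi' hj',
    pvGetD_set_eq]
  by_cases hii : i' = i
  · subst hii
    rw [if_pos ⟨rfl, by rw [hsh.1]; omega⟩, pvGetD_set_eq]
    by_cases hjj : j' = j
    · subst hjj
      rw [if_pos ⟨rfl, by rw [hrowlen]; omega⟩, if_pos ⟨rfl, rfl⟩]
    · rw [if_neg (by rintro ⟨h1, -⟩; exact hjj (by omega)),
        if_neg (by rintro ⟨-, h2⟩; exact hjj h2)]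
  · rw [if_neg (by rintro ⟨h1, -⟩; exact hii (by omega)),
      if_neg (by rintro ⟨h1, -⟩; exact hii h1)]

lemma pvStep_eq (s : String) {n ℓ a : Int} (h2 : 2 ≤ ℓ) (hln : ℓ ≤ n) (ha : 0 ≤ a)
    (haa : a < n - ℓ + 1) {dp : List (List Int)} (hsh : pvShape n dp)
    (hc : pvCorrect s n (ℓ - 2) dp) :
    pvStepI s ℓ dp a = pvSet2 dp a (a + ℓ - 1) (pvGG s a (a + ℓ - 1)) := by
  simp only [pvStepI]
  congr 1
  rw [pvGG_unfold s (show a < a + ℓ - 1 by omega)]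
  rw [hc (a + 1) (a + ℓ - 1) (by omega) (by omega) (by omega) (by omega) (by omega)]
  apply PySem.List.foldl_congr_mem
  intro acc k hk
  rw [PySem.List.mem_pyRange_one] at hk
  split_ifs with hcnd
  · rw [hc (a + 1) (k - 1) (by omega) (by omega) (by omega) (by omega) (by omega),
      hc k (a + ℓ - 1) (by omega) (by omega) (by omega) (by omega) (by omega)]
  · rfl

lemma pvInnerPass (s : String) {n ℓ : Int} (h2 : 2 ≤ ℓ) (hln : ℓ ≤ n) :
    ∀ d : Nat, ∀ a : Int, ((n - ℓ + 1) - a).toNat ≤ d → 0 ≤ a →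
    ∀ dp, pvShape n dp → pvCorrect s n (ℓ - 2) dp →
    (∀ i' : Int, 0 ≤ i' → i' < a → pvGet2 dp i' (i' + ℓ - 1) = pvGG s i' (i' + ℓ - 1)) →
    pvShape n ((PySem.List.pyRange a (n - ℓ + 1)).foldl (pvStepI s ℓ) dp) ∧
    pvCorrect s n (ℓ - 2) ((PySem.List.pyRange a (n - ℓ + 1)).foldl (pvStepI s ℓ) dp) ∧
    (∀ i' : Int, 0 ≤ i' → i' < n - ℓ + 1 →
      pvGet2 ((PySem.List.pyRange a (n - ℓ + 1)).foldl (pvStepI s ℓ) dp) i' (i' + ℓ - 1) = pvGG s i' (i' + ℓ - 1)) := by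
  intro d
  induction d with
  | zero =>
    intro a hda ha dp hsh hc hdiag
    rw [PySem.List.pyRange_one_eq_nil (by omega)]
    exact ⟨hsh, hc, fun i' h1 h2 => hdiag i' h1 (by omega)⟩
  | succ d ihd =>
    intro a hda ha dp hsh hc hdiag
    by_cases hna : n - ℓ + 1 ≤ a
    · rw [PySem.List.pyRange_one_eq_nil hna]
      exact ⟨hsh, hc, fun i' h1 h2 => hdiag i' h1 (by omega)⟩
    · rw [PySem.List.pyRange_one_cons (by omega), List.foldl_cons]
      rw [pvStep_eq s h2 hln ha (by omega) hsh hc]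
      apply ihd (a + 1) (by omega) (by omega)
      · exact pvSet2_shape hsh ha (by omega) _ _
      · intro i j hi hin hj hjn hw
        rw [pvSet2_get hsh _ ha (by omega) (by omega) (by omega) hi hin hj hjn]
        rw [if_neg (by rintro ⟨rfl, rfl⟩; omega)]
        exact hc i j hi hin hj hjn hw
      · intro i' h1 h2
        rw [pvSet2_get hsh _ ha (by omega) (by omega) (by omega) h1 (by omega) (by omega) (by omega)]
        by_cases hia : i' = a
        · subst hia; rw [if_pos ⟨rfl, rfl⟩]
        · rw [if_neg (by rintro ⟨rfl, -⟩; exact hia rfl)]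
          exact hdiag i' h1 (by omega)

lemma pvOuterPass (s : String) {n : Int} (hn : 0 ≤ n) :
    ∀ d : Nat, ∀ ℓ0 : Int, ((n + 1) - ℓ0).toNat ≤ d → 2 ≤ ℓ0 →
    ∀ dp, pvShape n dp → pvCorrect s n (ℓ0 - 2) dp →
    pvCorrect s n (n - 1) ((PySem.List.pyRange ℓ0 (n + 1)).foldl (fun dp length =>
      (PySem.List.pyRange 0 (n - length + 1)).foldl (pvStepI s length) dp) dp) := by
  intro d
  induction d with
  | zero =>
    intro ℓ0 hd hℓ dp hsh hc
    rw [PySem.List.pyRange_one_eq_nil (by omega)]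
    exact pvCorrect_mono hc (by omega)
  | succ d ihd =>
    intro ℓ0 hd hℓ dp hsh hc
    by_cases hle : n + 1 ≤ ℓ0
    · rw [PySem.List.pyRange_one_eq_nil hle]
      exact pvCorrect_mono hc (by omega)
    · rw [PySem.List.pyRange_one_cons (by omega), List.foldl_cons]
      have hinner := pvInnerPass s hℓ (show ℓ0 ≤ n by omega) ((n - ℓ0 + 1) - 0).toNat 0
        (by omega) (by omega) dp hsh hc (fun i' h1 h2 => absurd h2 (by omega))
      apply ihd (ℓ0 + 1) (by omega) (by omega) _ hinner.1
      intro i j hi hin hj hjn hw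
      by_cases hww : j - i ≤ ℓ0 - 2
      · exact hinner.2.1 i j hi hin hj hjn hww
      · have hji : j = i + ℓ0 - 1 := by omega
        rw [hji]
        exact hinner.2.2 i hi (by omega)

lemma pvDiagPass (s : String) {n : Int} :
    ∀ d : Nat, ∀ a : Int, (n - a).toNat ≤ d → 0 ≤ a →
    ∀ dp, pvShape n dp →
    (∀ i j : Int, 0 ≤ i → i < n → 0 ≤ j → j < n → pvGet2 dp i j = if i = j ∧ i < a then 2 else 0) →
    pvShape n ((PySem.List.pyRange a n).foldl (fun dp i => pvSet2 dp i i 2) dp) ∧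
    (∀ i j : Int, 0 ≤ i → i < n → 0 ≤ j → j < n →
      pvGet2 ((PySem.List.pyRange a n).foldl (fun dp i => pvSet2 dp i i 2) dp) i j = if i = j then 2 else 0) := by
  intro d
  induction d with
  | zero =>
    intro a hda ha dp hsh hdp
    rw [PySem.List.pyRange_one_eq_nil (by omega)]
    simp only [List.foldl_nil]
    refine ⟨hsh, fun i j hi hin hj hjn => ?_⟩
    rw [hdp i j hi hin hj hjn]
    split_ifs <;> omega
  | succ d ihd =>
    intro a hda ha dp hsh hdp
    by_cases hna : n ≤ a
    · rw [PySem.List.pyRange_one_eq_nil hna]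
      simp only [List.foldl_nil]
      refine ⟨hsh, fun i j hi hin hj hjn => ?_⟩
      rw [hdp i j hi hin hj hjn]
      split_ifs <;> omega
    · rw [PySem.List.pyRange_one_cons (by omega), List.foldl_cons]
      apply ihd (a + 1) (by omega) (by omega)
      · exact pvSet2_shape hsh ha (by omega) _ _
      · intro i j hi hin hj hjn
        rw [pvSet2_get hsh 2 ha (by omega) ha (by omega) hi hin hj hjn]
        by_cases hij : i = a ∧ j = a
        · rw [if_pos hij, if_pos ⟨by omega, by omega⟩]
        · rw [if_neg hij, hdp i j hi hin hj hjn]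
          split_ifs <;> omega

lemma pvA_eq (s : String) (hpre : s ≠ "") : min_push_pop s = pvGG s 0 (PySem.Str.len s - 1) := by
  have hn1 : 1 ≤ PySem.Str.len s := by
    rw [PySem.Str.len_eq]
    have : s.toList ≠ [] := fun hh => hpre (String.ext (by simpa using hh))
    have := List.length_pos_of_ne_nil this
    omega
  simp only [min_push_pop]
  set n : Int := PySem.Str.len s with hn
  have hsh0 : pvShape n ((PySem.List.pyRange 0 n).map (fun _ => List.replicate n.toNat (0 : Int))) := by
    constructor
    · rw [List.length_map, PySem.List.length_pyRange_one]; omega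
    · intro r hr
      obtain ⟨x, -, rfl⟩ := List.mem_map.mp hr
      exact List.length_replicate
  have hent0 : ∀ i j : Int, 0 ≤ i → i < n → 0 ≤ j → j < n →
      pvGet2 ((PySem.List.pyRange 0 n).map (fun _ => List.replicate n.toNat (0 : Int))) i j
        = if i = j ∧ i < 0 then 2 else 0 := by
    intro i j hi hin hj hjn
    rw [if_neg (by omega), pvGet2_getD _ hi hj]
    have h1 : ((PySem.List.pyRange 0 n).map (fun _ => List.replicate n.toNat (0 : Int))).getD i.toNat []
        = List.replicate n.toNat (0 : Int) := by
      rw [List.getD_eq_getElem _ _ (by rw [hsh0.1]; omega), List.getElem_map]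
    rw [h1, List.getD_eq_getElem _ _ (by rw [List.length_replicate]; omega),
      List.getElem_replicate]
  have hdiag := pvDiagPass s (n - 0).toNat 0 (by omega) (by omega) _ hsh0 hent0
  have hc0 : pvCorrect s n (2 - 2) ((PySem.List.pyRange 0 n).foldl (fun dp i => pvSet2 dp i i 2)
      ((PySem.List.pyRange 0 n).map (fun _ => List.replicate n.toNat (0 : Int)))) := by
    intro i j hi hin hj hjn hw
    rw [hdiag.2 i j hi hin hj hjn]
    by_cases hij : i = j
    · rw [if_pos hij, pvGG_of_eq hij]
    · rw [if_neg hij, pvGG_of_lt (by omega)]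
  have houter := pvOuterPass s (show (0:Int) ≤ n by omega) ((n + 1) - 2).toNat 2 (by omega)
    (by omega) _ hdiag.1 hc0
  exact houter 0 (n - 1) (by omega) (by omega) (by omega) (by omega) (by omega)

-- ===== VERDICT (by name: the statement is the Claim_ definition above) =====
theorem min_push_pop_spec : Claim_equal_min_push_pop := by
  intro s _ hpre
  unfold Spec_min_push_pop
  rw [pvA_eq s hpre, pvAlt_eq s]
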